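-- pv_equiv track=rewrite | github.com/OktamTurgun/django-rest-framework-course | lessons/35-environment/examples/05-env_validator.py | validate_secret_key
-- ===== SOURCE A (Python) =====
-- def validate_secret_key(secret_key: str) -> tuple:
--     """Validate SECRET_KEY"""
--     if not secret_key:
--         return False, "SECRET_KEY is required"
--
--     if len(secret_key) < 50:
--         return False, "SECRET_KEY must be at least 50 characters"
--
--     if 'django-insecure' in secret_key.lower():
--         return False, "SECRET_KEY contains 'django-insecure'"
--
--     # Check complexity
--     has_upper = any(c.isupper() for c in secret_key)
--     has_lower = any(c.islower() for c in secret_key)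
--     has_digit = any(c.isdigit() for c in secret_key)
--     has_special = any(c in '!@#$%^&*()_+-=' for c in secret_key)
--
--     if not all([has_upper, has_lower, has_digit, has_special]):
--         return False, "SECRET_KEY must contain uppercase, lowercase, digits, and special characters"
--
--     return True, "SECRET_KEY is secure"
-- ===== SOURCE B (Python) =====
-- _SPECIALS = '!@#$%^&*()_+-='
--
--
-- def _category(c):
--     """Classify a character into one of five disjoint classes."""
--     if c.isupper():
--         return 'U'
--     if c.islower():
--         return 'L'
--     if c.isdigit():
--         return 'D'
--     if c in _SPECIALS:
--         return 'S'
--     return 'O'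
--
--
-- def validate_secret_key(secret_key: str) -> tuple:
--     """Validate SECRET_KEY"""
--     seen = {_category(c) for c in secret_key}
--     checks = [
--         (len(secret_key) > 0, "SECRET_KEY is required"),
--         (len(secret_key) >= 50, "SECRET_KEY must be at least 50 characters"),
--         ('django-insecure' not in secret_key.lower(),
--          "SECRET_KEY contains 'django-insecure'"),
--         (set('ULDS') <= seen,
--          "SECRET_KEY must contain uppercase, lowercase, digits, and special characters"),
--     ]
--     for ok, msg in checks:
--         if not ok:
--             return False, msg
--     return True, "SECRET_KEY is secure"
-- ===== Notes on version B (the rewrite author's own statement) =====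
-- stated objective: alternative
-- what changed: B classifies each character once into one of five disjoint categories (upper/lower/digit/special/other), collects the set of category tags seen, and runs a data-driven rule table (first failing condition-message pair wins) with a set-subset test for the complexity rule, instead of A's hard-coded guard chain with four separate any()-scans.
import Mathlib
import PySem

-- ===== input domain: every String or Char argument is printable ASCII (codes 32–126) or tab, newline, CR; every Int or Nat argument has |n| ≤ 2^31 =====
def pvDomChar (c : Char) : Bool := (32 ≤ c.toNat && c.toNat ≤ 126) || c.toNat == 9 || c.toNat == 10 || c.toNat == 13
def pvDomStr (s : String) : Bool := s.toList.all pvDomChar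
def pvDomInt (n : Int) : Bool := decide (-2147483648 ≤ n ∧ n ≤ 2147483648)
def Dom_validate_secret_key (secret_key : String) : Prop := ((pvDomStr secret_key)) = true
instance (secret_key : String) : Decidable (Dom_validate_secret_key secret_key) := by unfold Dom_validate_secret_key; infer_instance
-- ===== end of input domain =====

-- B classifies each character once into disjoint categories, collects the set of categories seen,
-- and checks a data-driven rule table (first failing rule wins) against it (objective: alternative, same cost).

-- the string literal '!@#$%^&*()_+-=' of both Pythons, as its list of characters (exact: a str is its code points)
def vskSpecials : List Char := ['!', '@', '#', '$', '%', '^', '&', '*', '(', ')', '_', '+', '-', '=']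

-- ===== PORT A =====
def validate_secret_key (secret_key : String) : Bool × String :=
  if secret_key.toList = [] then (false, "SECRET_KEY is required")
  else if PySem.Str.len secret_key < 50 then (false, "SECRET_KEY must be at least 50 characters")
  else if PySem.Str.isIn "django-insecure" (PySem.Str.lower secret_key) then
    (false, "SECRET_KEY contains 'django-insecure'")
  else
    let has_upper := secret_key.toList.any (fun c => PySem.Chars.isupper c)
    let has_lower := secret_key.toList.any (fun c => PySem.Chars.islower c)
    let has_digit := secret_key.toList.any (fun c => PySem.Chars.isdigit c)
    let has_special := secret_key.toList.any (fun c => vskSpecials.contains c)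
    if !(has_upper && has_lower && has_digit && has_special) then
      (false, "SECRET_KEY must contain uppercase, lowercase, digits, and special characters")
    else (true, "SECRET_KEY is secure")

-- ===== PORT B =====
-- _category from Source B: first matching class wins, classes tried in order
def vskCategory (c : Char) : Char :=
  if PySem.Chars.isupper c then 'U'
  else if PySem.Chars.islower c then 'L'
  else if PySem.Chars.isdigit c then 'D'
  else if vskSpecials.contains c then 'S'
  else 'O'

-- the `for ok, msg in checks` loop of Source B: first failing rule wins
def vskFirstFail : List (Bool × String) → Bool × String
  | [] => (true, "SECRET_KEY is secure")
  | (ok, msg) :: rest => if !ok then (false, msg) else vskFirstFail rest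

def validate_secret_key_alt (secret_key : String) : Bool × String :=
  let seen : PySem.Set Char := PySem.Set.ofList (secret_key.toList.map vskCategory)
  vskFirstFail
    [ (decide (0 < PySem.Str.len secret_key), "SECRET_KEY is required"),
      (decide (50 ≤ PySem.Str.len secret_key), "SECRET_KEY must be at least 50 characters"),
      (!PySem.Str.isIn "django-insecure" (PySem.Str.lower secret_key), "SECRET_KEY contains 'django-insecure'"),
      (PySem.Set.issubset (PySem.Set.ofList ['U', 'L', 'D', 'S']) seen,
       "SECRET_KEY must contain uppercase, lowercase, digits, and special characters") ]

-- ===== PRECONDITION & SPEC =====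
def Spec_validate_secret_key (secret_key : String) (out : Bool × String) : Prop := out = validate_secret_key_alt secret_key
instance (secret_key : String) (out : Bool × String) : Decidable (Spec_validate_secret_key secret_key out) := by unfold Spec_validate_secret_key; infer_instance

-- ===== CLAIM =====
def Claim_equal_validate_secret_key : Prop := ∀ (secret_key : String), Dom_validate_secret_key secret_key → Spec_validate_secret_key secret_key (validate_secret_key secret_key)

-- ===== LEMMAS AND PROOFS =====
theorem vsk_isupper_iff (c : Char) :
    PySem.Chars.isupper c = true ↔ 65 ≤ c.toNat ∧ c.toNat ≤ 90 := by
  have hA : ('A').toNat = 65 := rfl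
  have hZ : ('Z').toNat = 90 := rfl
  simp only [PySem.Chars.isupper, Bool.and_eq_true, decide_eq_true_eq, Char.le_def,
    UInt32.le_iff_toNat_le, Char.toNat_val]
  omega

theorem vsk_islower_iff (c : Char) :
    PySem.Chars.islower c = true ↔ 97 ≤ c.toNat ∧ c.toNat ≤ 122 := by
  have ha : ('a').toNat = 97 := rfl
  have hz : ('z').toNat = 122 := rfl
  simp only [PySem.Chars.islower, Bool.and_eq_true, decide_eq_true_eq, Char.le_def,
    UInt32.le_iff_toNat_le, Char.toNat_val]
  omega

theorem vsk_isdigit_iff (c : Char) :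
    PySem.Chars.isdigit c = true ↔ 48 ≤ c.toNat ∧ c.toNat ≤ 57 := by
  have h0 : ('0').toNat = 48 := rfl
  have h9 : ('9').toNat = 57 := rfl
  simp only [PySem.Chars.isdigit, Bool.and_eq_true, decide_eq_true_eq, Char.le_def,
    UInt32.le_iff_toNat_le, Char.toNat_val]
  omega

theorem vsk_lower_not_upper (c : Char) (h : PySem.Chars.islower c = true) :
    PySem.Chars.isupper c = false := by
  rcases hu : PySem.Chars.isupper c with _ | _
  · rfl
  · rw [vsk_islower_iff] at h; rw [vsk_isupper_iff] at hu; omega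

theorem vsk_digit_not_upper (c : Char) (h : PySem.Chars.isdigit c = true) :
    PySem.Chars.isupper c = false := by
  rcases hu : PySem.Chars.isupper c with _ | _
  · rfl
  · rw [vsk_isdigit_iff] at h; rw [vsk_isupper_iff] at hu; omega

theorem vsk_digit_not_lower (c : Char) (h : PySem.Chars.isdigit c = true) :
    PySem.Chars.islower c = false := by
  rcases hl : PySem.Chars.islower c with _ | _
  · rfl
  · rw [vsk_isdigit_iff] at h; rw [vsk_islower_iff] at hl; omega

theorem vsk_special_not_alnum (c : Char) (h : vskSpecials.contains c = true) :
    PySem.Chars.isupper c = false ∧ PySem.Chars.islower c = false ∧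
      PySem.Chars.isdigit c = false := by
  have hm : c ∈ vskSpecials := by simpa using h
  fin_cases hm <;> exact ⟨rfl, rfl, rfl⟩

theorem vskCategory_eq_U (c : Char) : (vskCategory c = 'U') ↔ PySem.Chars.isupper c = true := by
  unfold vskCategory; split_ifs <;> simp_all

theorem vskCategory_eq_L (c : Char) : (vskCategory c = 'L') ↔ PySem.Chars.islower c = true := by
  constructor
  · intro h; unfold vskCategory at h; split_ifs at h <;> simp_all
  · intro h; unfold vskCategory; simp [vsk_lower_not_upper c h, h]

theorem vskCategory_eq_D (c : Char) : (vskCategory c = 'D') ↔ PySem.Chars.isdigit c = true := by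
  constructor
  · intro h; unfold vskCategory at h; split_ifs at h <;> simp_all
  · intro h; unfold vskCategory
    simp [vsk_digit_not_upper c h, vsk_digit_not_lower c h, h]

theorem vskCategory_eq_S (c : Char) : (vskCategory c = 'S') ↔ vskSpecials.contains c = true := by
  constructor
  · intro h; unfold vskCategory at h; split_ifs at h <;> simp_all
  · intro h
    obtain ⟨h1, h2, h3⟩ := vsk_special_not_alnum c h
    unfold vskCategory; simp [h1, h2, h3]; simpa using h

theorem seen_subset_iff (l : List Char) :
    PySem.Set.issubset (PySem.Set.ofList ['U', 'L', 'D', 'S']) (PySem.Set.ofList (l.map vskCategory)) =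
      (l.any (fun c => PySem.Chars.isupper c) && l.any (fun c => PySem.Chars.islower c) &&
       l.any (fun c => PySem.Chars.isdigit c) &&
       l.any (fun c => vskSpecials.contains c)) := by
  rw [Bool.eq_iff_iff, PySem.Set.issubset_iff]
  simp only [Bool.and_eq_true, List.any_eq_true, PySem.Set.mem_ofList, List.mem_map,
    List.mem_cons, List.not_mem_nil, or_false]
  constructor
  · intro h
    refine ⟨⟨⟨?_, ?_⟩, ?_⟩, ?_⟩
    · obtain ⟨c, hc, he⟩ := h 'U' (Or.inl rfl)
      exact ⟨c, hc, (vskCategory_eq_U c).1 he⟩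
    · obtain ⟨c, hc, he⟩ := h 'L' (Or.inr (Or.inl rfl))
      exact ⟨c, hc, (vskCategory_eq_L c).1 he⟩
    · obtain ⟨c, hc, he⟩ := h 'D' (Or.inr (Or.inr (Or.inl rfl)))
      exact ⟨c, hc, (vskCategory_eq_D c).1 he⟩
    · obtain ⟨c, hc, he⟩ := h 'S' (Or.inr (Or.inr (Or.inr rfl)))
      exact ⟨c, hc, (vskCategory_eq_S c).1 he⟩
  · rintro ⟨⟨⟨⟨cu, hcu, hu⟩, ⟨cl, hcl, hl⟩⟩, ⟨cd, hcd, hd⟩⟩, ⟨cs, hcs, hs⟩⟩ t ht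
    rcases ht with rfl | rfl | rfl | rfl
    · exact ⟨cu, hcu, (vskCategory_eq_U cu).2 hu⟩
    · exact ⟨cl, hcl, (vskCategory_eq_L cl).2 hl⟩
    · exact ⟨cd, hcd, (vskCategory_eq_D cd).2 hd⟩
    · exact ⟨cs, hcs, (vskCategory_eq_S cs).2 hs⟩

-- ===== VERDICT =====
theorem validate_secret_key_spec : Claim_equal_validate_secret_key := by
  intro s _
  unfold Spec_validate_secret_key validate_secret_key validate_secret_key_alt
  simp only [vskFirstFail, Bool.not_not]
  have hlen : PySem.Str.len s = (s.toList.length : Int) := rfl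
  by_cases h0 : s.toList = []
  · rw [if_pos h0, if_pos (show (!decide (0 < PySem.Str.len s)) = true by
      simp only [Bool.not_eq_true', decide_eq_false_iff_not, hlen, h0]; simp)]
  · rw [if_neg h0,
      if_neg (show ¬ (!decide (0 < PySem.Str.len s)) = true by
        have := List.length_pos_iff.mpr h0
        simp only [Bool.not_eq_true', decide_eq_false_iff_not, hlen]; omega)]
    by_cases h50 : PySem.Str.len s < 50
    · rw [if_pos h50, if_pos (show (!decide (50 ≤ PySem.Str.len s)) = true by
        simp only [Bool.not_eq_true', decide_eq_false_iff_not]; omega)]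
    · rw [if_neg h50,
        if_neg (show ¬ (!decide (50 ≤ PySem.Str.len s)) = true by
          simp only [Bool.not_eq_true', decide_eq_false_iff_not]; omega)]
      by_cases hins : PySem.Str.isIn "django-insecure" (PySem.Str.lower s) = true
      · rw [if_pos hins, if_pos hins]
      · rw [if_neg hins, if_neg hins, seen_subset_iff]
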